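-- pv_equiv track=rewrite | github.com/TheOnlySuch/hw_neto_files | Open_files.py | sorted_new
-- ===== SOURCE A (Python) =====
-- def sorted_new(line):
--     sort_dict = sorted(line.values())
--     sorted_dict = {}
--     for i in sort_dict:
--         for k in line.keys():
--             if line[k] == i:
--                 sorted_dict[k] = line[k]
--                 break
--     return sorted_dict
-- ===== SOURCE B (Python) =====
-- def sorted_new(line):
--     first = {}
--     for k, v in line.items():
--         if v not in first:
--             first[v] = k
--     return {first[v]: v for v in sorted(first)}
-- ===== Notes on version B (the rewrite author's own statement) =====
-- stated objective: alternative
-- what changed: B replaces A's inner linear scan of all keys for every sorted value (including repeats) by one pass building a value-to-first-key dict, then emits one entry per distinct value over the sorted distinct values.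
import Mathlib
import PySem

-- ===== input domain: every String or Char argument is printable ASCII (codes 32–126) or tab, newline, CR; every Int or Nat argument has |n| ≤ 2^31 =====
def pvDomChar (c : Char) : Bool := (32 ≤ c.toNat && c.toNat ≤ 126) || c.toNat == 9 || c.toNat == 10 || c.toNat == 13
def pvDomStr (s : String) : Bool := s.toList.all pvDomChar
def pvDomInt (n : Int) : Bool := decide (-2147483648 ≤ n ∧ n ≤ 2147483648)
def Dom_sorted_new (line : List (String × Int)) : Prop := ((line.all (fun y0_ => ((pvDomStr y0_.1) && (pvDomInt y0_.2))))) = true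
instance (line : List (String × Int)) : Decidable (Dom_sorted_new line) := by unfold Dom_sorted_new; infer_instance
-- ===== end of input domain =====

-- B builds a value→first-key dict in one pass and walks the sorted distinct values once,
-- replacing A's inner scan over all keys for every sorted value (including repeats).
-- The association-list argument is read as the Python dict it denotes (Dict.ofList).

-- ===== PORT A =====
-- inner 'for k in line.keys(): if line[k] == i: sorted_dict[k] = line[k]; break'
-- (line[k] with k drawn from line.keys() always succeeds, so getD is exact here)
def pvInnerA (d : PySem.Dict String Int) (i : Int) (acc : PySem.Dict String Int) :
    List String → PySem.Dict String Int
  | [] => acc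
  | k :: ks => if d.getD k 0 == i then acc.insert k i else pvInnerA d i acc ks

def sorted_new (line : List (String × Int)) : List (String × Int) :=
  let d := PySem.Dict.ofList line
  let sort_dict := PySem.List.sorted d.values (fun v => v)
  let sorted_dict := sort_dict.foldl (fun acc i => pvInnerA d i acc d.keys) PySem.Dict.empty
  sorted_dict.items

-- ===== PORT B =====
def sorted_new_alt (line : List (String × Int)) : List (String × Int) :=
  let d := PySem.Dict.ofList line
  -- first = {}; for k, v in line.items(): if v not in first: first[v] = k
  let first := d.items.foldl
    (fun f kv => if f.contains kv.2 then f else f.insert kv.2 kv.1) PySem.Dict.empty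
  -- {first[v]: v for v in sorted(first)}   (first[v] is always present, so getD is exact)
  ((PySem.List.sorted first.keys (fun v => v)).foldl
    (fun acc v => acc.insert (first.getD v "") v) PySem.Dict.empty).items

-- ===== PRECONDITION & SPEC =====
def Spec_sorted_new (line : List (String × Int)) (out : List (String × Int)) : Prop := out = sorted_new_alt line
instance (line : List (String × Int)) (out : List (String × Int)) : Decidable (Spec_sorted_new line out) := by unfold Spec_sorted_new; infer_instance

-- ===== CLAIM (what is proved, stated in full; the proofs are below) =====
def Claim_equal_sorted_new : Prop := ∀ (line : List (String × Int)), Dom_sorted_new line → Spec_sorted_new line (sorted_new line)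

-- ===== LEMMAS AND PROOFS =====

-- the first key of d holding value v ("" if v is not a value of d; never consulted then)
def pvG (d : PySem.Dict String Int) (v : Int) : String :=
  ((d.items.find? (fun kv => kv.2 == v)).map Prod.fst).getD ""

theorem pvFind?Congr {α : Type} (p q : α → Bool) (l : List α) (h : ∀ a ∈ l, p a = q a) :
    l.find? p = l.find? q := by
  induction l with
  | nil => rfl
  | cons a t ih =>
    have ha := h a (by simp)
    by_cases hp : p a
    · simp [List.find?, hp, ha ▸ hp]
    · have hq : q a = false := by rw [← ha]; simpa using hp
      simp [List.find?, hp, hq]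
      exact ih fun a ha' => h a (by simp [ha'])

theorem pvFoldlCongr {α β : Type} (l : List α) (f f' : β → α → β)
    (h : ∀ b a, a ∈ l → f b a = f' b a) : ∀ b, l.foldl f b = l.foldl f' b := by
  induction l with
  | nil => intro b; rfl
  | cons a t ih =>
    intro b
    simp only [List.foldl_cons, h b a (by simp)]
    exact ih (fun b a ha => h b a (by simp [ha])) _

theorem pvInnerA_eq (d : PySem.Dict String Int) (i : Int) (acc : PySem.Dict String Int)
    (ks : List String) :
    pvInnerA d i acc ks =
      match ks.find? (fun k => d.getD k 0 == i) with
      | some k => acc.insert k i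
      | none => acc := by
  induction ks with
  | nil => rfl
  | cons k ks ih =>
    by_cases h : d.getD k 0 == i
    · simp [pvInnerA, h, List.find?]
    · simp only [pvInnerA, h, if_false, Bool.false_eq_true, ih]
      rw [List.find?_cons_of_neg]
      simpa using h

-- the first-occurrence scan over d.keys finds the first item of d with value v
theorem pvKeysFind (l : List (String × Int)) (hnd : (l.map Prod.fst).Nodup) (v : Int) :
    (l.map Prod.fst).find? (fun k => (PySem.Dict.mk l).getD k 0 == v)
      = (l.find? (fun kv => kv.2 == v)).map Prod.fst := by
  induction l with
  | nil => rfl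
  | cons kv t ih =>
    obtain ⟨k0, v0⟩ := kv
    have hhead : (PySem.Dict.mk ((k0, v0) :: t)).getD k0 0 = v0 := by
      simp [PySem.Dict.getD_eq_get?_getD, PySem.Dict.get?_mk_cons]
    by_cases h : v0 == v
    · simp [List.find?, hhead, h]
    · have h2 : ((PySem.Dict.mk ((k0, v0) :: t)).getD k0 0 == v) = false := by
        rw [hhead]; simpa using h
      simp only [List.map_cons, List.find?_cons, h2, h]
      have hcong : (t.map Prod.fst).find?
            (fun k => (PySem.Dict.mk ((k0, v0) :: t)).getD k 0 == v)
          = (t.map Prod.fst).find? (fun k => (PySem.Dict.mk t).getD k 0 == v) := by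
        apply pvFind?Congr
        intro k hk
        have hne : (k0 == k) = false := by
          apply beq_eq_false_iff_ne.mpr
          intro he
          have : k0 ∈ t.map Prod.fst := he ▸ hk
          exact (List.nodup_cons.mp (by simpa using hnd)).1 this
        simp [PySem.Dict.getD_eq_get?_getD, PySem.Dict.get?_mk_cons, hne]
      rw [hcong, ih (List.nodup_cons.mp (by simpa using hnd)).2]

-- B's first-pass loop computes the first key per value
theorem pvFirstGet (l : List (String × Int)) :
    ∀ (f : PySem.Dict Int String) (v : Int),
      ((l.foldl (fun f kv => if f.contains kv.2 then f else f.insert kv.2 kv.1) f).get? v)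
        = match f.get? v with
          | some k => some k
          | none => (l.find? (fun kv => kv.2 == v)).map Prod.fst := by
  induction l with
  | nil =>
    intro f v
    cases h : f.get? v <;> simp [h]
  | cons kv t ih =>
    intro f v
    rw [List.foldl_cons]
    by_cases hc : f.contains kv.2 = true
    · rw [if_pos hc, ih]
      cases hk : f.get? v with
      | some k => simp
      | none =>
        have hvne : (kv.2 == v) = false := by
          apply beq_eq_false_iff_ne.mpr
          intro he
          rw [he] at hc
          have h1 := PySem.Dict.contains_eq_isSome_get? f v
          rw [hk, hc] at h1
          simp at h1
        rw [List.find?_cons_of_neg (by simp [hvne])]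
    · have hc' : f.contains kv.2 = false := by simpa using hc
      rw [if_neg hc, ih]
      have hnone : f.get? kv.2 = none := by
        have h1 := PySem.Dict.contains_eq_isSome_get? f kv.2
        rw [hc'] at h1
        exact Option.not_isSome_iff_eq_none.mp (by rw [← h1]; simp)
      by_cases hv : v = kv.2
      · subst hv
        have hins : (f.insert kv.2 kv.1).get? kv.2 = some kv.1 := by
          rw [PySem.Dict.get?_insert]; simp
        rw [hins, hnone, List.find?_cons_of_pos (by simp)]
        rfl
      · have hins : (f.insert kv.2 kv.1).get? v = f.get? v := by
          rw [PySem.Dict.get?_insert]; simp [hv]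
        rw [hins, List.find?_cons_of_neg (by simpa using fun he => hv he.symm)]

theorem pvFirstKeys (l : List (String × Int)) :
    ∀ (f : PySem.Dict Int String),
      ((l.foldl (fun f kv => if f.contains kv.2 then f else f.insert kv.2 kv.1) f).keys)
        = PySem.Set.update f.keys (l.map (fun kv => kv.2)) := by
  induction l with
  | nil => intro f; rfl
  | cons kv t ih =>
    intro f
    have hrhs : PySem.Set.update f.keys ((kv :: t).map (fun kv => kv.2))
        = PySem.Set.update (PySem.Set.add f.keys kv.2) (t.map (fun kv => kv.2)) := rfl
    rw [List.foldl_cons, hrhs]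
    by_cases hc : f.contains kv.2 = true
    · have hmem : kv.2 ∈ f.keys := (PySem.Dict.contains_iff_mem_keys f kv.2).mp hc
      have hadd : PySem.Set.add f.keys kv.2 = f.keys := by
        simp [PySem.Set.add, PySem.Set.contains, hmem]
      rw [if_pos hc, hadd]
      exact ih f
    · have hc' : f.contains kv.2 = false := by simpa using hc
      have hmem : kv.2 ∉ f.keys := fun h =>
        hc ((PySem.Dict.contains_iff_mem_keys f kv.2).mpr h)
      have hadd : PySem.Set.add f.keys kv.2 = f.keys ++ [kv.2] := by
        simp [PySem.Set.add, PySem.Set.contains, hmem]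
      have hkeys : (f.insert kv.2 kv.1).keys = f.keys ++ [kv.2] :=
        PySem.Dict.keys_insert_of_not_contains f kv.1 hc'
      rw [if_neg hc, hadd, ← hkeys]
      exact ih _

theorem pvInsertSelf {κ ν : Type} [BEq κ] [LawfulBEq κ]
    (d : PySem.Dict κ ν) (k : κ) (v : ν) (hnd : d.keys.Nodup) (h : (k, v) ∈ d.items) :
    d.insert k v = d := by
  apply PySem.Dict.ext
  rw [PySem.Dict.items_insert_of_contains d v
    ((PySem.Dict.contains_iff_mem_keys d k).mpr (PySem.Dict.mem_keys_of_mem_items d h))]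
  have hid : ∀ p ∈ d.items, (if (p.1 == k) = true then (k, v) else p) = p := by
    intro p hp
    obtain ⟨p1, p2⟩ := p
    by_cases he : p1 = k
    · subst he
      have h1 : d.get? p1 = some v := PySem.Dict.get?_of_mem_items d h hnd
      have h2 : d.get? p1 = some p2 :=
        PySem.Dict.get?_of_mem_items d hp hnd
      rw [h1] at h2
      injection h2 with h3
      simp [h3]
    · simp [he]
  rw [List.map_congr_left hid]
  simp

theorem pvSetAddMem {v : Int} {s : List Int} (h : v ∈ s) : PySem.Set.add s v = s := by
  simp [PySem.Set.add, PySem.Set.contains, h]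

theorem pvSetAddNotMem {v : Int} {s : List Int} (h : v ∉ s) :
    PySem.Set.add s v = s ++ [v] := by
  simp [PySem.Set.add, PySem.Set.contains, h]

-- folding 'insert (g v) v' over L with g injective keeps first occurrences in order
theorem pvFoldIns (g : Int → String) :
    ∀ (L M : List Int), M.Nodup →
      (∀ v w, v ∈ M ++ L → w ∈ M ++ L → g v = g w → v = w) →
      L.foldl (fun acc v => acc.insert (g v) v)
          (PySem.Dict.mk (M.map (fun v => (g v, v))))
        = PySem.Dict.mk ((PySem.Set.update M L).map (fun v => (g v, v))) := by
  intro L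
  induction L with
  | nil => intro M _ _; rfl
  | cons v t ih =>
    intro M hM hinj
    have hkeys : (PySem.Dict.mk (M.map (fun v => (g v, v)))).keys = M.map g := by
      simp [PySem.Dict.keys]
    have hndk : (M.map g).Nodup := by
      apply List.Nodup.map_on _ hM
      intro x hx y hy hxy
      exact hinj x y (by simp [hx]) (by simp [hy]) hxy
    have hupd : PySem.Set.update M (v :: t)
        = PySem.Set.update (PySem.Set.add M v) t := rfl
    by_cases hv : v ∈ M
    · have hmem : ((g v, v)) ∈ (M.map (fun v => (g v, v))) :=
        List.mem_map.mpr ⟨v, hv, rfl⟩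
      have hself : (PySem.Dict.mk (M.map (fun v => (g v, v)))).insert (g v) v
          = PySem.Dict.mk (M.map (fun v => (g v, v))) := by
        apply pvInsertSelf _ _ _ (by rw [hkeys]; exact hndk)
        simpa using hmem
      rw [List.foldl_cons, hself, hupd, pvSetAddMem hv]
      exact ih M hM (fun a b ha hb => hinj a b
        (by simp at ha ⊢; tauto) (by simp at hb ⊢; tauto))
    · have hnc : (PySem.Dict.mk (M.map (fun v => (g v, v)))).contains (g v) = false := by
        rw [PySem.Dict.contains_eq_decide_mem_keys, hkeys]
        simp only [decide_eq_false_iff_not]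
        intro hgv
        rcases List.mem_map.mp hgv with ⟨w, hw, hgw⟩
        exact hv (hinj w v (by simp [hw]) (by simp) hgw ▸ hw)
      have hins : (PySem.Dict.mk (M.map (fun v => (g v, v)))).insert (g v) v
          = PySem.Dict.mk ((M ++ [v]).map (fun v => (g v, v))) := by
        apply PySem.Dict.ext
        rw [PySem.Dict.items_insert_of_not_contains _ v hnc]
        simp
      rw [List.foldl_cons, hins, hupd, pvSetAddNotMem hv]
      have hM' : (M ++ [v]).Nodup := by
        simp [List.nodup_append, hM]
        intro a ha he
        exact hv (he ▸ ha)
      exact ih (M ++ [v]) hM' (fun a b ha hb => hinj a b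
        (by simp at ha ⊢; tauto) (by simp at hb ⊢; tauto))

-- set(xs) is a subsequence of xs
theorem pvOfListSublistAux (ys : List Int) :
    ∀ (t s : List Int), s.Sublist t → (ys.foldl PySem.Set.add s).Sublist (t ++ ys) := by
  induction ys with
  | nil => intro t s h; simpa using h
  | cons y ys ih =>
    intro t s h
    rw [List.foldl_cons]
    have hstep : (PySem.Set.add s y).Sublist (t ++ [y]) := by
      by_cases hm : y ∈ s
      · rw [pvSetAddMem hm]; exact h.trans (List.sublist_append_left t [y])
      · rw [pvSetAddNotMem hm]; exact List.Sublist.append h (List.Sublist.refl [y])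
    have := ih (t ++ [y]) _ hstep
    simpa [List.append_assoc] using this

theorem pvOfListSublist (ys : List Int) : (PySem.Set.ofList ys).Sublist ys := by
  have := pvOfListSublistAux ys [] [] (List.Sublist.refl [])
  rw [PySem.Set.ofList_eq_foldl]
  simpa using this

-- dedup of the sorted list = sorted of the dedup
theorem pvDedupSorted (xs : List Int) :
    PySem.Set.ofList (PySem.List.sorted xs (fun v => v))
      = PySem.List.sorted (PySem.Set.ofList xs) (fun v => v) := by
  symm
  apply PySem.List.sorted_eq_of_perm_of_pairwise_lt
  · rw [List.perm_ext_iff_of_nodup (PySem.Set.nodup_ofList _) (PySem.Set.nodup_ofList _)]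
    intro a
    simp [PySem.Set.mem_ofList, PySem.List.mem_sorted]
  · have hle : (PySem.Set.ofList (PySem.List.sorted xs (fun v => v))).Pairwise
        (fun a b => a ≤ b) :=
      List.Pairwise.sublist (pvOfListSublist _)
        (by simpa using PySem.List.sorted_pairwise xs (fun v => v))
    have hne : (PySem.Set.ofList (PySem.List.sorted xs (fun v => v))).Pairwise
        (fun a b => a ≠ b) := PySem.Set.nodup_ofList _
    exact (hle.and hne).imp (fun h => lt_of_le_of_ne h.1 h.2)

theorem pvGetG (d : PySem.Dict String Int) (hnd : d.keys.Nodup) (v : Int)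
    (hv : v ∈ d.values) : d.get? (pvG d v) = some v := by
  have hv' : v ∈ d.items.map Prod.snd := by simpa [PySem.Dict.values] using hv
  cases hfind : d.items.find? (fun kv => kv.2 == v) with
  | none =>
    exfalso
    rcases List.mem_map.mp hv' with ⟨kv, hkv, h2⟩
    have := List.find?_eq_none.mp hfind kv hkv
    simp [h2] at this
  | some kv =>
    have hmem := List.mem_of_find?_eq_some hfind
    have hval : kv.2 = v := by have := List.find?_some hfind; simpa using this
    have hpg : pvG d v = kv.1 := by simp [pvG, hfind]
    rw [hpg]
    have : (kv.1, v) ∈ d.items := by rw [← hval]; simpa using hmem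
    exact PySem.Dict.get?_of_mem_items d this hnd

-- the whole equivalence, over an arbitrary dict with distinct keys
theorem pvMain (d : PySem.Dict String Int) (hnd : d.keys.Nodup) :
    ((PySem.List.sorted d.values (fun v => v)).foldl
        (fun acc i => pvInnerA d i acc d.keys) PySem.Dict.empty).items
    = ((PySem.List.sorted
          (d.items.foldl (fun f kv => if f.contains kv.2 then f else f.insert kv.2 kv.1)
            PySem.Dict.empty).keys (fun v => v)).foldl
        (fun acc v => acc.insert
          ((d.items.foldl (fun f kv => if f.contains kv.2 then f else f.insert kv.2 kv.1)
            PySem.Dict.empty).getD v "") v) PySem.Dict.empty).items := by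
  have hG : ∀ v ∈ d.values, d.get? (pvG d v) = some v := fun v hv => pvGetG d hnd v hv
  have hinj : ∀ v w, v ∈ d.values → w ∈ d.values → pvG d v = pvG d w → v = w := by
    intro v w hv hw he
    have h1 := hG v hv
    rw [he, hG w hw] at h1
    injection h1 with h2
    exact h2.symm
  -- A side
  have hLmem : ∀ v ∈ PySem.List.sorted d.values (fun v => v), v ∈ d.values :=
    fun v hv => (PySem.List.mem_sorted d.values (fun v => v) false v).mp hv
  have hstepA : ∀ (acc : PySem.Dict String Int) v,
      v ∈ PySem.List.sorted d.values (fun v => v) →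
      pvInnerA d v acc d.keys = acc.insert (pvG d v) v := by
    intro acc v hv
    rw [pvInnerA_eq]
    have hkf : d.keys.find? (fun k => d.getD k 0 == v)
        = (d.items.find? (fun kv => kv.2 == v)).map Prod.fst :=
      pvKeysFind d.items hnd v
    have hv' : v ∈ d.items.map Prod.snd := by
      simpa [PySem.Dict.values] using hLmem v hv
    cases hfind : d.items.find? (fun kv => kv.2 == v) with
    | none =>
      exfalso
      rcases List.mem_map.mp hv' with ⟨kv, hkv, h2⟩
      have := List.find?_eq_none.mp hfind kv hkv
      simp [h2] at this
    | some kv =>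
      have hpg : pvG d v = kv.1 := by simp [pvG, hfind]
      rw [hkf, hfind, hpg]
      rfl
  have hA : (PySem.List.sorted d.values (fun v => v)).foldl
      (fun acc i => pvInnerA d i acc d.keys) PySem.Dict.empty
      = (PySem.List.sorted d.values (fun v => v)).foldl
        (fun acc v => acc.insert (pvG d v) v) PySem.Dict.empty :=
    pvFoldlCongr _ _ _ (fun b a ha => hstepA b a ha) _
  have hAfold : (PySem.List.sorted d.values (fun v => v)).foldl
      (fun acc v => acc.insert (pvG d v) v) PySem.Dict.empty
      = PySem.Dict.mk ((PySem.Set.ofList (PySem.List.sorted d.values (fun v => v))).map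
          (fun v => (pvG d v, v))) := by
    have := pvFoldIns (pvG d) (PySem.List.sorted d.values (fun v => v)) [] List.nodup_nil
      (fun v w hv hw he => hinj v w (hLmem v (by simpa using hv)) (hLmem w (by simpa using hw)) he)
    simpa [PySem.Set.update, PySem.Set.ofList_eq_foldl] using this
  -- B side
  have hFget : ∀ v, (d.items.foldl
        (fun f kv => if f.contains kv.2 then f else f.insert kv.2 kv.1)
        PySem.Dict.empty).getD v "" = pvG d v := by
    intro v
    rw [PySem.Dict.getD_eq_get?_getD, pvFirstGet]
    simp only [PySem.Dict.get?_empty]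
    rfl
  have hFkeys : (d.items.foldl
        (fun f kv => if f.contains kv.2 then f else f.insert kv.2 kv.1)
        PySem.Dict.empty).keys = PySem.Set.ofList d.values := by
    rw [pvFirstKeys]
    simp only [PySem.Dict.keys_empty]
    rw [PySem.Set.ofList_eq_foldl]
    rfl
  have hSmem : ∀ v ∈ PySem.List.sorted (PySem.Set.ofList d.values) (fun v => v),
      v ∈ d.values := by
    intro v hv
    exact (PySem.Set.mem_ofList d.values v).mp
      ((PySem.List.mem_sorted _ (fun v => v) false v).mp hv)
  have hSnodup : (PySem.List.sorted (PySem.Set.ofList d.values) (fun v => v)).Nodup :=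
    (PySem.List.sorted_perm (PySem.Set.ofList d.values) (fun v => v) false).symm.nodup
      (PySem.Set.nodup_ofList d.values)
  rw [hA, hAfold]
  rw [show ((d.items.foldl
      (fun f kv => if f.contains kv.2 then f else f.insert kv.2 kv.1)
      PySem.Dict.empty).keys) = PySem.Set.ofList d.values from hFkeys]
  have h1 : (PySem.List.sorted (PySem.Set.ofList d.values) (fun v => v)).foldl
      (fun acc v => acc.insert ((d.items.foldl
        (fun f kv => if f.contains kv.2 then f else f.insert kv.2 kv.1)
        PySem.Dict.empty).getD v "") v) PySem.Dict.empty
      = (PySem.List.sorted (PySem.Set.ofList d.values) (fun v => v)).foldl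
        (fun acc v => acc.insert (pvG d v) v) PySem.Dict.empty :=
    pvFoldlCongr _ _ _ (fun b a _ => by rw [hFget]) _
  have h2 : (PySem.List.sorted (PySem.Set.ofList d.values) (fun v => v)).foldl
      (fun acc v => acc.insert (pvG d v) v) PySem.Dict.empty
      = PySem.Dict.mk ((PySem.Set.ofList
          (PySem.List.sorted (PySem.Set.ofList d.values) (fun v => v))).map
          (fun v => (pvG d v, v))) := by
    have := pvFoldIns (pvG d) (PySem.List.sorted (PySem.Set.ofList d.values) (fun v => v))
      [] List.nodup_nil
      (fun v w hv hw he => hinj v w (hSmem v (by simpa using hv)) (hSmem w (by simpa using hw)) he)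
    simpa [PySem.Set.update, PySem.Set.ofList_eq_foldl] using this
  rw [h1, h2]
  rw [PySem.Set.ofList_eq_self_of_nodup _ hSnodup]
  rw [pvDedupSorted]

-- ===== VERDICT (by name: the statement is the Claim_ definition above) =====
theorem sorted_new_spec : Claim_equal_sorted_new := by
  intro line _
  unfold Spec_sorted_new sorted_new sorted_new_alt
  exact pvMain (PySem.Dict.ofList line) (PySem.Dict.nodup_keys_ofList line)
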